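-- pv_equiv track=rewrite | github.com/manwar/perlweeklychallenge-club | challenge-268/pokgopun/python/ch-1.py | magicNumber
-- ===== SOURCE A (Python) =====
-- def magicNumber(x: tuple, y: tuple):
--     l = len(x)
--     if l == 0 or l != len(y):
--         return None
--     x, y = sorted(x), sorted(y)
--     d = y[0]-x[0]
--     for i in range(1,l):
--         if d != y[i]-x[i]:
--             return None
--     return d
-- ===== SOURCE B (Python) =====
-- def magicNumber(x: tuple, y: tuple):
--     l = len(x)
--     if l == 0 or l != len(y):
--         return None
--     d = min(y) - min(x)
--     cnt = {}
--     for yi in y: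
--         cnt[yi] = cnt.get(yi, 0) + 1
--     for xi in x:
--         k = xi + d
--         if cnt.get(k, 0) == 0:
--             return None
--         cnt[k] = cnt[k] - 1
--     return d
-- ===== Notes on version B (the rewrite author's own statement) =====
-- stated objective: alternative
-- what changed: Replaces sorting both lists and scanning pairwise differences by computing d = min(y) - min(x) and checking multiset equality of y against the shifted x with a hash-map counter; it trades A's O(n log n) comparison sorts for O(n) counting passes (not measurably faster in CPython).
import Mathlib
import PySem

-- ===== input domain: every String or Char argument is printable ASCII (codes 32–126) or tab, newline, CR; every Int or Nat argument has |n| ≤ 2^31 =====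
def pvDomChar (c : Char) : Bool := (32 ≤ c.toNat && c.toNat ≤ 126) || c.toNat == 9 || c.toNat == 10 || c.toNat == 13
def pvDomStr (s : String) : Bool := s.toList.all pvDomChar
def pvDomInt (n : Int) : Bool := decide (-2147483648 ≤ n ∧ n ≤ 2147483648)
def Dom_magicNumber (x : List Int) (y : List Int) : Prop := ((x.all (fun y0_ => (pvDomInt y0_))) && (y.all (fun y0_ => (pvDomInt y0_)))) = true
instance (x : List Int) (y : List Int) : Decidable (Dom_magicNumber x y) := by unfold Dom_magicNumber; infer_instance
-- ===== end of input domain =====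

-- B replaces sorting both lists and a pairwise-difference scan by d = min(y) - min(x)
-- and a counter-based multiset check of y against the shifted x (objective: alternative).

-- ===== PORT A =====
def magicNumber (x : List Int) (y : List Int) : Option Int :=
  let l := x.length
  if l == 0 || l != y.length then none
  else
    let xs := PySem.List.sorted x (fun v => v) false
    let ys := PySem.List.sorted y (fun v => v) false
    let d := PySem.List.pyGetD ys 0 0 - PySem.List.pyGetD xs 0 0
    let ok := (PySem.List.pyRange 1 (l : Int) 1).foldl
      (fun ok i => ok && decide (d = PySem.List.pyGetD ys i 0 - PySem.List.pyGetD xs i 0)) true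
    if ok then some d else none

-- ===== PORT B =====
-- body of B's second loop: early 'return None' carried as the none state
def bStep (d : Int) (st : Option (PySem.Dict Int Int)) (xi : Int) : Option (PySem.Dict Int Int) :=
  match st with
  | none => none
  | some c =>
    let k := xi + d
    if c.getD k 0 == 0 then none
    else some (c.insert k (c.getD k 0 - 1))

def magicNumber_alt (x : List Int) (y : List Int) : Option Int :=
  let l := x.length
  if l == 0 || l != y.length then none
  else
    match PySem.List.min? y (fun v => v), PySem.List.min? x (fun v => v) with
    | some my, some mx =>
      let d := my - mx
      let cnt := y.foldl (fun c yi => c.insert yi (c.getD yi 0 + 1)) PySem.Dict.empty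
      match x.foldl (bStep d) (some cnt) with
      | none => none
      | some _ => some d
    | _, _ => none

-- ===== PRECONDITION & SPEC =====
def Spec_magicNumber (x : List Int) (y : List Int) (out : Option Int) : Prop := out = magicNumber_alt x y
instance (x : List Int) (y : List Int) (out : Option Int) : Decidable (Spec_magicNumber x y out) := by unfold Spec_magicNumber; infer_instance

-- ===== CLAIM (what is proved, stated in full; the proofs are below) =====
def Claim_equal_magicNumber : Prop := ∀ (x : List Int) (y : List Int), Dom_magicNumber x y → Spec_magicNumber x y (magicNumber x y)

-- ===== LEMMAS AND PROOFS =====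

lemma foldl_and_eq_all (p : Int → Bool) (l : List Int) (b : Bool) :
    l.foldl (fun ok i => ok && p i) b = (b && l.all p) := by
  induction l generalizing b with
  | nil => simp
  | cons a t ih => cases b <;> simp [ih, Bool.false_and] <;> cases p a <;> simp [ih]

lemma foldl_bStep_none (d : Int) (l : List Int) : l.foldl (bStep d) none = none := by
  induction l with
  | nil => rfl
  | cons a t ih => simpa [bStep] using ih

-- B's subtraction loop succeeds iff the shifted x is a sub-multiset (counted in m)
lemma bLoop_isSome (d : Int) (x' : List Int) (c : PySem.Dict Int Int) (m : List Int)
    (hc : ∀ v, c.getD v 0 = (m.count v : Int)) :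
    (x'.foldl (bStep d) (some c)).isSome = true ↔ ∀ v, (x'.map (· + d)).count v ≤ m.count v := by
  induction x' generalizing c m with
  | nil => simp
  | cons xi rest ih =>
    simp only [List.foldl_cons, bStep]
    by_cases h0 : c.getD (xi + d) 0 = 0
    · have hm : m.count (xi + d) = 0 := by have := hc (xi + d); omega
      simp only [h0, beq_self_eq_true, if_true, foldl_bStep_none d rest]
      constructor
      · intro h; exact absurd h (by simp)
      · intro h
        have := h (xi + d)
        simp [List.count_cons_self, hm] at this
    · have hm1 : 1 ≤ m.count (xi + d) := by have := hc (xi + d); omega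
      have hbeq : (c.getD (xi + d) 0 == 0) = false := by simpa using h0
      simp only [hbeq, Bool.false_eq_true, if_false]
      have hc' : ∀ v, (c.insert (xi + d) (c.getD (xi + d) 0 - 1)).getD v 0
          = ((m.erase (xi + d)).count v : Int) := by
        intro v
        rw [PySem.Dict.getD_insert, List.count_erase]
        by_cases hv : v = xi + d
        · simp only [hv, if_true, hc (xi + d), beq_self_eq_true, if_true]
          omega
        · have : ((xi + d) == v) = false := by simpa using (Ne.symm hv)
          simp [hv, this, hc v]
      rw [ih _ _ hc']
      constructor
      · intro h v
        have hv := h v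
        rcases eq_or_ne v (xi + d) with hvk | hvk
        · subst hvk
          simp [List.count_erase, List.count_cons] at hv ⊢ <;> omega
        · simp [List.count_erase, List.count_cons, hvk, Ne.symm hvk] at hv ⊢ <;> omega
      · intro h v
        have hv := h v
        rcases eq_or_ne v (xi + d) with hvk | hvk
        · subst hvk
          simp [List.count_erase, List.count_cons] at hv ⊢ <;> omega
        · simp [List.count_erase, List.count_cons, hvk, Ne.symm hvk] at hv ⊢ <;> omega

-- counts ≤ everywhere plus equal lengths force a permutation
lemma perm_of_count_le {l m : List Int} (hlen : l.length = m.length)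
    (h : ∀ v, l.count v ≤ m.count v) : m.Perm l := by
  have hle : (l : Multiset Int) ≤ (m : Multiset Int) := by
    rw [Multiset.le_iff_count]; intro a; simpa using h a
  have hcard : Multiset.card (m : Multiset Int) ≤ Multiset.card (l : Multiset Int) := by
    simpa using hlen.ge
  have := Multiset.eq_of_le_of_card_le hle hcard
  exact (List.Perm.symm (Multiset.coe_eq_coe.mp this))

-- the first element of the sorted list is the min? value
lemma head_sorted_eq_min (y : List Int) (hy : y ≠ []) (m : Int)
    (hm : PySem.List.min? y (fun v => v) = some m) :
    (PySem.List.sorted y (fun v => v) false).getD 0 0 = m := by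
  set ys := PySem.List.sorted y (fun v => v) false with hys
  have hperm : ys.Perm y := PySem.List.sorted_perm y (fun v => v) false
  have hys_ne : ys ≠ [] :=
    fun h => hy ((PySem.List.sorted_eq_nil_iff y (fun v => v) false).mp (hys ▸ h))
  obtain ⟨a, t, hat⟩ := List.exists_cons_of_ne_nil hys_ne
  have hhead : ∀ v ∈ y, a ≤ v := by
    have := PySem.List.key_head_sorted_le y (fun v => v) (by rw [← hys, hat])
    simpa using this
  have hmin : ∀ v ∈ y, m ≤ v := by
    intro v hv
    simpa using PySem.List.min?_isMin (xs := y) (key := fun v => v) hm v hv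
  have ham : a ∈ y := hperm.mem_iff.mp (by simp [hat])
  have hmm : m ∈ y := PySem.List.min?_mem hm
  have h1 : a ≤ m := hhead m hmm
  have h2 : m ≤ a := hmin a ham
  rw [hat]
  simp; omega

-- A's scan succeeds exactly when sorted y is sorted x shifted by d0
lemma A_ok_iff (x y : List Int) (hx : x ≠ []) (hl : x.length = y.length) (d0 : Int)
    (hd0 : d0 = (PySem.List.sorted y (fun v => v) false).getD 0 0
               - (PySem.List.sorted x (fun v => v) false).getD 0 0) :
    ((PySem.List.pyRange 1 (x.length : Int) 1).all
      (fun i => decide (d0 = PySem.List.pyGetD (PySem.List.sorted y (fun v => v) false) i 0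
                           - PySem.List.pyGetD (PySem.List.sorted x (fun v => v) false) i 0)) = true)
    ↔ PySem.List.sorted y (fun v => v) false
        = (PySem.List.sorted x (fun v => v) false).map (· + d0) := by
  set xs := PySem.List.sorted x (fun v => v) false with hxs
  set ys := PySem.List.sorted y (fun v => v) false with hys
  have hlx : xs.length = x.length := by rw [hxs]; exact PySem.List.length_sorted _ _ _
  have hly : ys.length = y.length := by rw [hys]; exact PySem.List.length_sorted _ _ _
  have hxpos : 0 < x.length := List.length_pos_iff.mpr hx
  rw [List.all_eq_true]
  constructor
  · intro h
    apply List.ext_getElem (by simp [hlx, hly, hl])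
    intro k hk1 hk2
    have hkx : k < x.length := by omega
    have hkxs : k < xs.length := by omega
    rw [List.getElem_map]
    rw [← List.getD_eq_getElem ys 0 hk1, ← List.getD_eq_getElem xs 0 hkxs]
    rcases Nat.eq_zero_or_pos k with hk0 | hkpos
    · subst hk0; omega
    · have hmem : ((k : Int)) ∈ PySem.List.pyRange 1 (x.length : Int) 1 := by
        rw [PySem.List.mem_pyRange_one]
        constructor <;> [exact_mod_cast hkpos; exact_mod_cast hkx]
      have := h _ hmem
      rw [decide_eq_true_iff, PySem.List.pyGetD_natCast, PySem.List.pyGetD_natCast] at this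
      omega
  · intro h i hi
    rw [PySem.List.mem_pyRange_one] at hi
    obtain ⟨hi1, hi2⟩ := hi
    have hiN : i = ((i.toNat : Nat) : Int) := by omega
    have hik : i.toNat < x.length := by omega
    rw [decide_eq_true_iff, hiN, PySem.List.pyGetD_natCast, PySem.List.pyGetD_natCast]
    have hk1 : i.toNat < ys.length := by omega
    have hk2 : i.toNat < xs.length := by omega
    have hk3 : i.toNat < (xs.map (· + d0)).length := by simpa using hk2
    have hmap : ys.getD i.toNat 0 = (xs.map (· + d0)).getD i.toNat 0 := by rw [h]
    rw [List.getD_eq_getElem _ 0 hk3, List.getElem_map, ← List.getD_eq_getElem xs 0 hk2] at hmap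
    omega

-- sorted y = shifted sorted x  ↔  y is a permutation of the shifted x
lemma sorted_shift_iff_perm (x y : List Int) (d : Int) :
    PySem.List.sorted y (fun v => v) false
      = (PySem.List.sorted x (fun v => v) false).map (· + d)
    ↔ y.Perm (x.map (· + d)) := by
  set xs := PySem.List.sorted x (fun v => v) false with hxs
  have hpx : xs.Perm x := PySem.List.sorted_perm x (fun v => v) false
  have hpy : (PySem.List.sorted y (fun v => v) false).Perm y :=
    PySem.List.sorted_perm y (fun v => v) false
  constructor
  · intro h
    have h1 : (xs.map (· + d)).Perm (x.map (· + d)) := hpx.map _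
    rw [← h] at h1
    exact hpy.symm.trans h1
  · intro h
    apply PySem.List.sorted_id_eq_of_perm_of_pairwise
    · exact (hpx.map (· + d)).trans h.symm
    · have hp := PySem.List.sorted_pairwise x (fun v => v)
      rw [← hxs] at hp
      exact List.Pairwise.map _ (fun {a b} hab => by simpa using hab) hp

-- ===== VERDICT (by name: the statement is the Claim_ definition above) =====
theorem magicNumber_spec : Claim_equal_magicNumber := by
  intro x y _
  unfold Spec_magicNumber magicNumber magicNumber_alt
  by_cases hg : (x.length == 0 || x.length != y.length) = true
  · simp [hg]
  · simp only [hg, if_false]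
    have hx : x ≠ [] := by
      intro h; subst h; simp at hg
    have hl : x.length = y.length := by
      simp [Bool.or_eq_true] at hg; omega
    have hy : y ≠ [] := by
      intro h
      have h2 := hl
      rw [h] at h2; simp at h2
      exact hx h2

    -- min? values exist
    obtain ⟨my, hmy⟩ : ∃ m, PySem.List.min? y (fun v => v) = some m := by
      cases h : PySem.List.min? y (fun v => v) with
      | none => exact absurd ((PySem.List.min?_eq_none_iff y _).mp h) hy
      | some m => exact ⟨m, rfl⟩
    obtain ⟨mx, hmx⟩ : ∃ m, PySem.List.min? x (fun v => v) = some m := by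
      cases h : PySem.List.min? x (fun v => v) with
      | none => exact absurd ((PySem.List.min?_eq_none_iff x _).mp h) hx
      | some m => exact ⟨m, rfl⟩
    simp only [hmy, hmx]
    set d := my - mx with hd
    -- A's d0 equals d
    set xs := PySem.List.sorted x (fun v => v) false with hxs
    set ys := PySem.List.sorted y (fun v => v) false with hys
    have hg0y : PySem.List.pyGetD ys 0 0 = ys.getD 0 0 := by
      have : ((0:Int)) = ((0:Nat) : Int) := rfl
      rw [this, PySem.List.pyGetD_natCast]
    have hg0x : PySem.List.pyGetD xs 0 0 = xs.getD 0 0 := by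
      have : ((0:Int)) = ((0:Nat) : Int) := rfl
      rw [this, PySem.List.pyGetD_natCast]
    have hd0 : PySem.List.pyGetD ys 0 0 - PySem.List.pyGetD xs 0 0 = d := by
      rw [hg0y, hg0x, head_sorted_eq_min y hy my hmy, head_sorted_eq_min x hx mx hmx]
    rw [hd0]
    -- characterize A's scan
    rw [foldl_and_eq_all, Bool.true_and]
    -- characterize B's loop
    have hcnt : ∀ v, (y.foldl (fun c yi => c.insert yi (c.getD yi 0 + 1)) PySem.Dict.empty).getD v 0
        = (y.count v : Int) := by
      intro v
      rw [PySem.Dict.getD_foldl_insert_add_one, PySem.Dict.getD_empty]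
      simp
    have hB := bLoop_isSome d x _ y hcnt
    by_cases hperm : y.Perm (x.map (· + d))
    · have hok : (PySem.List.pyRange 1 (x.length : Int) 1).all
          (fun i => decide (d = PySem.List.pyGetD ys i 0 - PySem.List.pyGetD xs i 0)) = true := by
        rw [A_ok_iff x y hx hl d (by rw [← hg0y, ← hg0x, hd0])]
        exact (sorted_shift_iff_perm x y d).mpr hperm
      have hBs : (x.foldl (bStep d)
          (some (y.foldl (fun c yi => c.insert yi (c.getD yi 0 + 1)) PySem.Dict.empty))).isSome = true := by
        rw [hB]
        intro v
        exact le_of_eq (List.perm_iff_count.mp hperm v).symm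
      rw [hok]
      simp only [if_true]
      cases hr : x.foldl (bStep d) (some (y.foldl (fun c yi => c.insert yi (c.getD yi 0 + 1)) PySem.Dict.empty)) with
      | none => rw [hr] at hBs; simp at hBs
      | some c => rfl
    · have hok : (PySem.List.pyRange 1 (x.length : Int) 1).all
          (fun i => decide (d = PySem.List.pyGetD ys i 0 - PySem.List.pyGetD xs i 0)) = false := by
        rw [Bool.eq_false_iff]
        intro hcontra
        exact hperm ((sorted_shift_iff_perm x y d).mp
          ((A_ok_iff x y hx hl d (by rw [← hg0y, ← hg0x, hd0])).mp hcontra))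
      have hBn : x.foldl (bStep d) (some (y.foldl (fun c yi => c.insert yi (c.getD yi 0 + 1)) PySem.Dict.empty)) = none := by
        cases hr : x.foldl (bStep d) (some (y.foldl (fun c yi => c.insert yi (c.getD yi 0 + 1)) PySem.Dict.empty)) with
        | none => rfl
        | some c =>
          exfalso
          apply hperm
          apply perm_of_count_le (by simpa using hl)
          exact hB.mp (by rw [hr]; rfl)
      rw [hok, hBn]
      simp
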